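-- pv_equiv track=rewrite | github.com/k-shah7/Project-Euler | Euler/q005.py | check_division
-- ===== SOURCE A (Python) =====
-- def check_division(number):
--
--     for divisor in range(1, 21):
--
--         if number % divisor == 0:
--             answer = True
--         else:
--             answer = False
--             break
--
--     return answer
-- ===== SOURCE B (Python) =====
-- def check_division(number):
--     # 232792560 = lcm(1..20); divisibility by all of 1..20 is one modulo test
--     return number % 232792560 == 0
-- ===== Notes on version B (the rewrite author's own statement) =====
-- stated objective: faster
-- what changed: Replaces the loop over divisors 1..20 with a single closed-form modulo test against their LCM 232792560.
import Mathlib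
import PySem

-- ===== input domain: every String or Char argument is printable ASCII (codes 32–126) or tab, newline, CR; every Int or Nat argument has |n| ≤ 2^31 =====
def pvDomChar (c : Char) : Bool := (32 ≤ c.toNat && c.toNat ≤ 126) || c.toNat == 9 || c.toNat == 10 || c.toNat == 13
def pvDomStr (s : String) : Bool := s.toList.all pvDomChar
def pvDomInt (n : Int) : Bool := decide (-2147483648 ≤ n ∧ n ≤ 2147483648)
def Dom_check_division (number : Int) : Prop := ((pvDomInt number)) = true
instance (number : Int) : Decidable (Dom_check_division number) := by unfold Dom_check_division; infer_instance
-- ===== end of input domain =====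

-- B replaces A's 20-iteration divisor loop with a single modulo test against lcm(1..20) = 232792560 (faster by a constant factor).

-- ===== PORT A =====
-- for divisor in range(1, 21): answer = True if number % divisor == 0 else (False; break)
def checkLoopA (number : Int) : List Int → Bool
  | [] => true
  | d :: rest => if PySem.Int.mod number d == 0 then checkLoopA number rest else false

def check_division (number : Int) : Bool :=
  checkLoopA number (PySem.List.pyRange 1 21 1)

-- ===== PORT B =====
def check_division_alt (number : Int) : Bool :=
  PySem.Int.mod number 232792560 == 0

-- ===== PRECONDITION & SPEC =====
def Spec_check_division (number : Int) (out : Bool) : Prop := out = check_division_alt number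
instance (number : Int) (out : Bool) : Decidable (Spec_check_division number out) := by unfold Spec_check_division; infer_instance

-- ===== CLAIM (what is proved, stated in full; the proofs are below) =====
def Claim_equal_check_division : Prop := ∀ (number : Int), Dom_check_division number → Spec_check_division number (check_division number)

-- ===== LEMMAS AND PROOFS =====

theorem pyRange_1_21 : PySem.List.pyRange 1 21 1 =
    [1,2,3,4,5,6,7,8,9,10,11,12,13,14,15,16,17,18,19,20] := by decide

theorem checkLoopA_true_iff (n : Int) (L : List Int) :
    checkLoopA n L = true ↔ ∀ d ∈ L, PySem.Int.mod n d = 0 := by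
  induction L with
  | nil => simp [checkLoopA]
  | cons d rest ih =>
    by_cases h : PySem.Int.mod n d = 0
    · simp [checkLoopA, h, ih]
    · simp [checkLoopA, h]

theorem isCoprime_int_of_gcd (a b : Int) (h : Int.gcd a b = 1) : IsCoprime a b :=
  Int.isCoprime_iff_gcd_eq_one.mpr h

theorem lcm_dvd_of_all (n : Int)
    (h5 : (5:Int) ∣ n) (h7 : (7:Int) ∣ n) (h9 : (9:Int) ∣ n) (h11 : (11:Int) ∣ n)
    (h13 : (13:Int) ∣ n) (h16 : (16:Int) ∣ n) (h17 : (17:Int) ∣ n) (h19 : (19:Int) ∣ n) :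
    (232792560:Int) ∣ n := by
  have d1 : (16*9:Int) ∣ n := (isCoprime_int_of_gcd 16 9 (by decide)).mul_dvd h16 h9
  have d2 : (16*9*5:Int) ∣ n := (isCoprime_int_of_gcd (16*9) 5 (by decide)).mul_dvd d1 h5
  have d3 : (16*9*5*7:Int) ∣ n := (isCoprime_int_of_gcd (16*9*5) 7 (by decide)).mul_dvd d2 h7
  have d4 : (16*9*5*7*11:Int) ∣ n := (isCoprime_int_of_gcd (16*9*5*7) 11 (by decide)).mul_dvd d3 h11
  have d5 : (16*9*5*7*11*13:Int) ∣ n := (isCoprime_int_of_gcd (16*9*5*7*11) 13 (by decide)).mul_dvd d4 h13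
  have d6 : (16*9*5*7*11*13*17:Int) ∣ n := (isCoprime_int_of_gcd (16*9*5*7*11*13) 17 (by decide)).mul_dvd d5 h17
  have d7 : (16*9*5*7*11*13*17*19:Int) ∣ n := (isCoprime_int_of_gcd (16*9*5*7*11*13*17) 19 (by decide)).mul_dvd d6 h19
  norm_num at d7
  exact d7

theorem loop_iff_lcm (n : Int) :
    (∀ d ∈ PySem.List.pyRange 1 21 1, PySem.Int.mod n d = 0) ↔ (232792560:Int) ∣ n := by
  rw [pyRange_1_21]
  constructor
  · intro h
    refine lcm_dvd_of_all n ?_ ?_ ?_ ?_ ?_ ?_ ?_ ?_ <;>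
      [exact (PySem.Int.mod_eq_zero_iff_dvd n 5).mp (h 5 (by decide));
       exact (PySem.Int.mod_eq_zero_iff_dvd n 7).mp (h 7 (by decide));
       exact (PySem.Int.mod_eq_zero_iff_dvd n 9).mp (h 9 (by decide));
       exact (PySem.Int.mod_eq_zero_iff_dvd n 11).mp (h 11 (by decide));
       exact (PySem.Int.mod_eq_zero_iff_dvd n 13).mp (h 13 (by decide));
       exact (PySem.Int.mod_eq_zero_iff_dvd n 16).mp (h 16 (by decide));
       exact (PySem.Int.mod_eq_zero_iff_dvd n 17).mp (h 17 (by decide));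
       exact (PySem.Int.mod_eq_zero_iff_dvd n 19).mp (h 19 (by decide))]
  · intro h d hd
    refine (PySem.Int.mod_eq_zero_iff_dvd n d).mpr (dvd_trans ?_ h)
    fin_cases hd <;> decide

-- ===== VERDICT (by name: the statement is the Claim_ definition above) =====
theorem check_division_spec : Claim_equal_check_division := by
  intro n _
  unfold Spec_check_division check_division check_division_alt
  rw [Bool.eq_iff_iff]
  rw [checkLoopA_true_iff, loop_iff_lcm]
  rw [beq_iff_eq, PySem.Int.mod_eq_zero_iff_dvd]
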